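-- pv_equiv track=rewrite | github.com/mrbartrns/algorithm-and-structure | swea/stack/dp_p1.py | dp
-- ===== SOURCE A (Python) =====
-- def dp(n):
--     m = [0, 1]
--     for i in range(2, n + 1):
--         if i % 2 == 0:
--             m.append(2 * m[i - 1] + 1)
--         else:
--             m.append(2 * m[i - 1] - 1)
--     return m[n]
-- ===== SOURCE B (Python) =====
-- def dp(n):
--     # Closed form: dp(n) = (2**(n+1) + (-1)**n) / 3 for n >= 1, with dp(0) = 0.
--     if n == 0:
--         return 0
--     return ((1 << (n + 1)) + (-1) ** n) // 3
-- ===== Notes on version B (the rewrite author's own statement) =====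
-- stated objective: faster
-- what changed: Replaced the O(n) loop that builds the whole list m with the closed form (2^(n+1)+(-1)^n)//3 (n=0 special-cased), computed with a single shift.
-- outside the precondition, e.g. on dp(-1): A returns 1, B returns 0.0; on dp(-2): A returns 0, B raises ValueError
import Mathlib
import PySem

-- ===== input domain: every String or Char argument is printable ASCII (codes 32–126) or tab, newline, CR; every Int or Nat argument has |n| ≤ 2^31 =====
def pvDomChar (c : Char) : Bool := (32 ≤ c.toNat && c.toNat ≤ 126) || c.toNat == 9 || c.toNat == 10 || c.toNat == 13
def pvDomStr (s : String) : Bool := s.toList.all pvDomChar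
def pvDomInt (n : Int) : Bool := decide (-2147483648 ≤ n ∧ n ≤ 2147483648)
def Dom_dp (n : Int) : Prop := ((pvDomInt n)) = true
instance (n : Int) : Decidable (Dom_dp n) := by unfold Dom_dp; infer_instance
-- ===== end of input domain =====

-- B replaces A's O(n) list-building loop with the closed form (2^(n+1)+(-1)^n)//3 (n=0 special-cased): asymptotically faster.

-- ===== PORT A =====
def dp (n : Int) : Int :=
  let m := (PySem.List.pyRange 2 (n + 1) 1).foldl
    (fun m i =>
      if PySem.Int.mod i 2 = 0 then m ++ [2 * PySem.List.pyGetD m (i - 1) 0 + 1]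
      else m ++ [2 * PySem.List.pyGetD m (i - 1) 0 - 1]) [0, 1]
  PySem.List.pyGetD m n 0

-- ===== PORT B =====
def dp_alt (n : Int) : Int :=
  if n = 0 then 0
  else PySem.Int.floordiv (2 ^ (n + 1).toNat + (-1) ^ n.toNat) 3

-- ===== PRECONDITION & SPEC =====
-- Pre_ excludes negative n (outside the function's natural domain of indices): there A's negative
-- indexing is accidental — it returns wraparound values at n = -1, -2 and raises IndexError for n ≤ -3.
def Pre_dp (n : Int) : Prop := 0 ≤ n
instance (n : Int) : Decidable (Pre_dp n) := by unfold Pre_dp; infer_instance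
def pvWitness_dp : Int := 5
def Spec_dp (n : Int) (out : Int) : Prop := out = dp_alt n
instance (n : Int) (out : Int) : Decidable (Spec_dp n out) := by unfold Spec_dp; infer_instance

-- ===== CLAIM (what is proved, stated in full; the proofs are below) =====
def Claim_equal_dp : Prop := ∀ (n : Int), Dom_dp n → Pre_dp n → Spec_dp n (dp n)

-- ===== LEMMAS AND PROOFS =====

-- the recurrence A computes, written on Nat
def hseq : Nat → Int
  | 0 => 0
  | 1 => 1
  | (k + 2) => if (k + 2) % 2 = 0 then 2 * hseq (k + 1) + 1 else 2 * hseq (k + 1) - 1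

lemma three_mul_hseq : ∀ k : Nat, 3 * hseq (k + 1) = 2 ^ (k + 2) + (-1) ^ (k + 1) := by
  intro k
  induction k with
  | zero => simp [hseq]
  | succ k ih =>
    have hk2 : ((k + 2) % 2 = 0) ↔ (k % 2 = 0) := by omega
    rcases Nat.even_or_odd k with he | ho
    · have h0 : k % 2 = 0 := Nat.even_iff.mp he
      have hp : (-1 : Int) ^ k = 1 := Even.neg_one_pow he
      have hp1 : (-1 : Int) ^ (k + 1) = -1 := by rw [pow_succ, hp]; ring
      have hp2 : (-1 : Int) ^ (k + 2) = 1 := by rw [pow_succ, hp1]; ring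
      show 3 * hseq (k + 2) = 2 ^ (k + 3) + (-1) ^ (k + 2)
      rw [hseq, if_pos (hk2.mpr h0), hp2]
      have : (2 : Int) ^ (k + 3) = 2 * 2 ^ (k + 2) := by ring
      rw [this]; rw [hp1] at ih; omega
    · have h0 : ¬ (k + 2) % 2 = 0 := by have := Nat.odd_iff.mp ho; omega
      have hp : (-1 : Int) ^ k = -1 := Odd.neg_one_pow ho
      have hp1 : (-1 : Int) ^ (k + 1) = 1 := by rw [pow_succ, hp]; ring
      have hp2 : (-1 : Int) ^ (k + 2) = -1 := by rw [pow_succ, hp1]; ring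
      show 3 * hseq (k + 2) = 2 ^ (k + 3) + (-1) ^ (k + 2)
      rw [hseq, if_neg h0, hp2]
      have : (2 : Int) ^ (k + 3) = 2 * 2 ^ (k + 2) := by ring
      rw [this]; rw [hp1] at ih; omega

lemma hseq_eq_closed (k : Nat) :
    hseq (k + 1) = PySem.Int.floordiv (2 ^ (k + 2) + (-1) ^ (k + 1)) 3 := by
  rw [← three_mul_hseq k, PySem.Int.floordiv_eq_ediv_of_pos (by norm_num)]
  omega

-- the step function of A's loop
def stepA (m : List Int) (i : Int) : List Int :=
  if PySem.Int.mod i 2 = 0 then m ++ [2 * PySem.List.pyGetD m (i - 1) 0 + 1]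
  else m ++ [2 * PySem.List.pyGetD m (i - 1) 0 - 1]

lemma loop_invariant : ∀ k : Nat,
    (PySem.List.pyRange 2 ((k : Int) + 1 + 1) 1).foldl stepA [0, 1]
      = (List.range (k + 2)).map hseq := by
  intro k
  induction k with
  | zero =>
    rw [PySem.List.pyRange_one_eq_nil (by norm_num)]
    simp [List.range_succ, hseq]
  | succ k ih =>
    have hb : (2 : Int) ≤ (k : Int) + 1 + 1 := by omega
    have : ((k : Int) + 1 + 1 + 1) = ((k : Int) + 1 + 1) + 1 := by ring
    rw [show ((k + 1 : Nat) : Int) + 1 + 1 = ((k : Int) + 1 + 1) + 1 by push_cast; ring,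
        PySem.List.pyRange_one_succ_right hb, List.foldl_append, ih]
    show stepA ((List.range (k + 2)).map hseq) ((k : Int) + 1 + 1) = (List.range (k + 3)).map hseq
    have hidx : PySem.List.pyGetD ((List.range (k + 2)).map hseq) ((k : Int) + 1 + 1 - 1) 0
        = hseq (k + 1) := by
      rw [show (k : Int) + 1 + 1 - 1 = ((k + 1 : Nat) : Int) by push_cast; ring,
          PySem.List.pyGetD_natCast]
      simp [List.getD]
    have hmod : PySem.Int.mod ((k : Int) + 1 + 1) 2 = (((k + 2) % 2 : Nat) : Int) := by
      rw [show (k : Int) + 1 + 1 = ((k + 2 : Nat) : Int) by push_cast; ring]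
      exact_mod_cast PySem.Int.mod_natCast (k + 2) 2
    rw [show (List.range (k + 3)).map hseq
          = (List.range (k + 2)).map hseq ++ [hseq (k + 2)] by rw [List.range_succ]; simp]
    unfold stepA
    rw [hidx, hmod]
    by_cases hpar : (k + 2) % 2 = 0
    · rw [if_pos (by exact_mod_cast congrArg (Nat.cast (R := Int)) hpar)]
      rw [show hseq (k + 2) = 2 * hseq (k + 1) + 1 by rw [hseq, if_pos hpar]]
    · rw [if_neg (by exact_mod_cast fun h => hpar (by exact_mod_cast h))]
      rw [show hseq (k + 2) = 2 * hseq (k + 1) - 1 by rw [hseq, if_neg hpar]]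

-- ===== VERDICT (by name: the statement is the Claim_ definition above) =====
theorem dp_spec : Claim_equal_dp := by
  intro n _ hpre
  unfold Spec_dp dp dp_alt
  obtain ⟨k, rfl⟩ : ∃ k : Nat, n = (k : Int) := ⟨n.toNat, (Int.toNat_of_nonneg hpre).symm⟩
  cases k with
  | zero =>
    rw [PySem.List.pyRange_one_eq_nil (by norm_num)]
    norm_num [PySem.List.pyGetD_zero_cons]
  | succ j =>
    have hfold := loop_invariant j
    rw [show ((j + 1 : Nat) : Int) + 1 = (j : Int) + 1 + 1 by push_cast; ring]
    show PySem.List.pyGetD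
        ((PySem.List.pyRange 2 ((j : Int) + 1 + 1) 1).foldl
          (fun m i =>
            if PySem.Int.mod i 2 = 0 then m ++ [2 * PySem.List.pyGetD m (i - 1) 0 + 1]
            else m ++ [2 * PySem.List.pyGetD m (i - 1) 0 - 1]) [0, 1])
        ((j + 1 : Nat) : Int) 0 = _
    rw [show (fun m i =>
          if PySem.Int.mod i 2 = 0 then m ++ [2 * PySem.List.pyGetD m (i - 1) 0 + 1]
          else m ++ [2 * PySem.List.pyGetD m (i - 1) 0 - 1]) = stepA from rfl, hfold]
    rw [PySem.List.pyGetD_natCast]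
    have h1 : (List.getD ((List.range (j + 2)).map hseq) (j + 1) 0) = hseq (j + 1) := by
      simp [List.getD]
    rw [h1, if_neg (by positivity), hseq_eq_closed j,
        show ((j : Int) + 1 + 1).toNat = j + 2 by omega,
        show ((((j : Nat) + 1 : Nat)) : Int).toNat = j + 1 by omega]
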